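-- pv_equiv track=rewrite | github.com/squancy/aoc-solutions | 2023/9.py | get_lf_nums
-- ===== SOURCE A (Python) =====
-- def get_lf_nums(nums, last):
--   lf_nums = []
--   for n in nums:
--     ns = [n[-1] if last else n[0]]
--     cur_seq = n
--     while True:
--       arr = []
--       all_zero = True
--       for i in range(len(cur_seq) - 1):
--         x = cur_seq[i + 1] - cur_seq[i]
--         if (i == len(cur_seq) - 2 and last) or (i == 0 and not last):
--           ns.append(x)
--         arr.append(x)
--         if x != 0:
--           all_zero = False
--       if all_zero:
--         break
--       cur_seq = arr
--     lf_nums.append(ns)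
--   return lf_nums
-- ===== SOURCE B (Python) =====
-- def get_lf_nums(nums, last):
--   def levels(seq):
--     if len(seq) < 2:
--       return []
--     diffs = [b - a for a, b in zip(seq, seq[1:])]
--     boundary = diffs[-1] if last else diffs[0]
--     if any(diffs):
--       return [boundary] + levels(diffs)
--     return [boundary]
--   return [[n[-1] if last else n[0]] + levels(n) for n in nums]
-- ===== Notes on version B (the rewrite author's own statement) =====
-- stated objective: simpler
-- what changed: Replaces A's imperative while-loop with an index-conditional append inside the inner for-loop by a direct recursion over difference sequences that picks the boundary element of each level, collected per sequence with a comprehension.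
import Mathlib
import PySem

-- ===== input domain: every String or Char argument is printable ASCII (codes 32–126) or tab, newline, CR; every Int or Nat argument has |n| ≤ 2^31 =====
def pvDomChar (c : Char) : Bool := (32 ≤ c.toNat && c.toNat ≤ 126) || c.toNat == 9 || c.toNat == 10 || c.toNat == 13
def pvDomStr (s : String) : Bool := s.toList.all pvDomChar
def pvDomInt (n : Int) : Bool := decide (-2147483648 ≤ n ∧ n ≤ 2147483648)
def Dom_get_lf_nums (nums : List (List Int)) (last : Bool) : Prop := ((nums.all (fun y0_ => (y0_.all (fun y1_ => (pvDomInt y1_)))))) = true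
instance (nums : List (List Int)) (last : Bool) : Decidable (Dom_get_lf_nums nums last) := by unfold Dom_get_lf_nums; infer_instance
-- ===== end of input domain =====

-- B replaces A's imperative while-loop (with an index-conditional append inside the
-- inner for-loop) by a direct recursion over difference sequences; objective: simpler.

-- ===== PORT A =====
-- inner 'for i in range(len(cur_seq) - 1)' loop of A, as an index recursion over the
-- same state (ns-appends, arr, all_zero); pyGet?.getD totalizes the in-range indexing;
-- fuel (always called with fuel = cur.length ≥ remaining iterations) keeps it structural
def pvInnerA (cur : List Int) (last : Bool) (fuel : Nat) (i : Nat) (ns arr : List Int)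
    (az : Bool) : List Int × List Int × Bool :=
  match fuel with
  | 0 => (ns, arr, az)
  | fuel + 1 =>
    if i < cur.length - 1 then
      let x := (PySem.List.pyGet? cur ((i : Int) + 1)).getD 0 - (PySem.List.pyGet? cur (i : Int)).getD 0
      let ns' := if ((i : Int) == (cur.length : Int) - 2 && last) || ((i : Int) == 0 && !last)
                 then ns ++ [x] else ns
      let az' := if x != 0 then false else az
      pvInnerA cur last fuel (i + 1) ns' (arr ++ [x]) az'
    else (ns, arr, az)

-- the 'while True' loop of A; the difference list is strictly shorter each round,
-- so fuel = cur.length suffices and the fuel-out branch is never reached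
def pvLoopA (fuel : Nat) (cur : List Int) (last : Bool) (ns : List Int) : List Int :=
  match fuel with
  | 0 => ns
  | fuel + 1 =>
    let r := pvInnerA cur last cur.length 0 [] [] true
    if r.2.2 then ns ++ r.1 else pvLoopA fuel r.2.1 last (ns ++ r.1)

def get_lf_nums (nums : List (List Int)) (last : Bool) : List (List Int) :=
  nums.foldl (fun lf_nums n =>
    let ns := [if last then (PySem.List.pyGet? n (-1)).getD 0 else (PySem.List.pyGet? n 0).getD 0]
    lf_nums ++ [pvLoopA n.length n last ns]) []

-- ===== PORT B =====
-- recursion over difference sequences; each level is one shorter, so fuel = seq.length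
-- suffices and the fuel-out branch is never reached
def pvLevels (fuel : Nat) (last : Bool) (seq : List Int) : List Int :=
  match fuel with
  | 0 => []
  | fuel + 1 =>
    if seq.length < 2 then []
    else
      let diffs := (seq.zip (PySem.List.slice seq (some 1) none)).map (fun p => p.2 - p.1)
      let b := if last then (PySem.List.pyGet? diffs (-1)).getD 0 else (PySem.List.pyGet? diffs 0).getD 0
      if diffs.any (fun x => x != 0) then b :: pvLevels fuel last diffs else [b]

def get_lf_nums_alt (nums : List (List Int)) (last : Bool) : List (List Int) :=
  nums.map (fun n =>
    (if last then (PySem.List.pyGet? n (-1)).getD 0 else (PySem.List.pyGet? n 0).getD 0)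
      :: pvLevels n.length last n)

-- ===== PRECONDITION & SPEC =====
-- Pre_ excludes inner empty lists, on which Python A raises IndexError (n[0]/n[-1])
def Pre_get_lf_nums (nums : List (List Int)) (last : Bool) : Prop := ∀ n ∈ nums, n ≠ []
instance (nums : List (List Int)) (last : Bool) : Decidable (Pre_get_lf_nums nums last) := by
  unfold Pre_get_lf_nums; infer_instance
def pvWitness_get_lf_nums : List (List Int) × Bool := ([[10, 13, 16, 21, 30, 45], [3]], true)

def Spec_get_lf_nums (nums : List (List Int)) (last : Bool) (out : List (List Int)) : Prop := out = get_lf_nums_alt nums last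
instance (nums : List (List Int)) (last : Bool) (out : List (List Int)) : Decidable (Spec_get_lf_nums nums last out) := by unfold Spec_get_lf_nums; infer_instance

-- ===== CLAIM (what is proved, stated in full; the proofs are below) =====
def Claim_equal_get_lf_nums : Prop := ∀ (nums : List (List Int)) (last : Bool), Dom_get_lf_nums nums last → Pre_get_lf_nums nums last → Spec_get_lf_nums nums last (get_lf_nums nums last)

-- ===== LEMMAS AND PROOFS =====
def pvDiffs (cur : List Int) : List Int := List.zipWith (fun a b => b - a) cur (cur.drop 1)

def pvApp (cur : List Int) (last : Bool) (i : Nat) : List Int :=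
  let dt := (pvDiffs cur).drop i
  if dt.isEmpty then [] else if last then [dt.getLastD 0] else if i = 0 then [dt.headD 0] else []

theorem length_pvDiffs (cur : List Int) : (pvDiffs cur).length = cur.length - 1 := by
  simp [pvDiffs]

theorem drop_pvDiffs_cons (cur : List Int) (i : Nat) (h : i < (pvDiffs cur).length) :
    (pvDiffs cur).drop i = (pvDiffs cur)[i] :: (pvDiffs cur).drop (i + 1) :=
  (List.getElem_cons_drop h).symm

theorem getLastD_of_ne_nil {l : List Int} (h : l ≠ []) (d d' : Int) :
    l.getLastD d = l.getLastD d' := by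
  rw [List.getLastD_eq_getLast?, List.getLastD_eq_getLast?,
      List.getLast?_eq_getLast_of_ne_nil h]
  rfl

theorem pvApp_step (cur : List Int) (last : Bool) (i : Nat) (h : i < (pvDiffs cur).length) :
    (if ((i : Int) == (cur.length : Int) - 2 && last) || ((i : Int) == 0 && !last)
     then [(pvDiffs cur)[i]] else []) ++ pvApp cur last (i + 1) = pvApp cur last i := by
  have hD := length_pvDiffs cur
  have hlen : 2 ≤ cur.length := by omega
  have hne : ¬ ((pvDiffs cur).drop i).isEmpty := by
    simp [List.isEmpty_iff, List.drop_eq_nil_iff]; omega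
  have hcons := drop_pvDiffs_cons cur i h
  cases last with
  | false =>
    simp only [Bool.and_false, Bool.not_false, Bool.and_true, Bool.false_or]
    by_cases hi : i = 0
    · subst hi
      have : ((0 : Nat) : Int) == 0 := by decide
      rw [if_pos this]
      unfold pvApp
      simp only [hne, if_false, Bool.false_eq_true, if_neg (by omega : ¬ (0 + 1 = 0)),
                 ite_self, List.append_nil]
      simp [hne, hcons]
    · have : ¬ (((i : Nat) : Int) == 0) = true := by simp; omega
      rw [if_neg this]
      unfold pvApp
      simp [hne, hi]
  | true =>
    simp only [Bool.and_true, Bool.not_true, Bool.and_false, Bool.or_false]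
    by_cases hi : i = cur.length - 2
    · have hc : (((i : Nat) : Int) == (cur.length : Int) - 2) = true := by
        simp; omega
      rw [if_pos hc]
      have hdrop : (pvDiffs cur).drop (i + 1) = [] := by
        rw [List.drop_eq_nil_iff]; omega
      unfold pvApp
      simp [hdrop, hne, hcons]
    · have hc : ¬ (((i : Nat) : Int) == (cur.length : Int) - 2) = true := by
        simp; omega
      rw [if_neg hc]
      have hne' : ¬ ((pvDiffs cur).drop (i + 1)).isEmpty := by
        simp [List.isEmpty_iff, List.drop_eq_nil_iff]; omega
      have hnil' : (pvDiffs cur).drop (i + 1) ≠ [] := by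
        simpa [List.isEmpty_iff] using hne'
      unfold pvApp
      simp only [hne, hne', if_false, Bool.false_eq_true, List.nil_append]
      simp only [if_true]
      rw [hcons, List.getLastD_cons, getLastD_of_ne_nil hnil']

theorem pvInnerA_spec (cur : List Int) (last : Bool) :
    ∀ (fuel i : Nat) (ns arr : List Int) (az : Bool), cur.length - 1 - i ≤ fuel →
    pvInnerA cur last fuel i ns arr az =
      (ns ++ pvApp cur last i, arr ++ (pvDiffs cur).drop i,
       az && ((pvDiffs cur).drop i).all (· == 0)) := by
  have hD := length_pvDiffs cur
  intro fuel
  induction fuel with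
  | zero =>
    intro i ns arr az hk
    have hdrop : (pvDiffs cur).drop i = [] := by rw [List.drop_eq_nil_iff]; omega
    simp [pvInnerA, hdrop, pvApp]
  | succ fuel ih =>
    intro i ns arr az hk
    by_cases h : i < cur.length - 1
    · rw [pvInnerA, if_pos h]
      have hcast : ((i : Int) + 1) = (((i + 1 : Nat)) : Int) := by push_cast; ring
      have hx1 : (PySem.List.pyGet? cur ((i : Int) + 1)).getD 0 = cur[i + 1]'(by omega) := by
        rw [hcast, PySem.List.pyGet?_natCast, List.getElem?_eq_getElem (by omega)]
        rfl
      have hx0 : (PySem.List.pyGet? cur ((i : Int))).getD 0 = cur[i]'(by omega) := by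
        rw [PySem.List.pyGet?_natCast, List.getElem?_eq_getElem (by omega)]
        rfl
      have hxD : cur[i + 1]'(by omega) - cur[i]'(by omega) = (pvDiffs cur)[i]'(by omega) := by
        simp [pvDiffs]
      simp only [hx1, hx0, hxD]
      rw [ih (i + 1) _ _ _ (by omega)]
      have hcons := drop_pvDiffs_cons cur i (by omega)
      have hi' : i < (pvDiffs cur).length := by omega
      have e1 : ((if (((i : Nat) : Int) == (cur.length : Int) - 2 && last) ||
                     (((i : Nat) : Int) == 0 && !last)
                  then ns ++ [(pvDiffs cur)[i]'hi'] else ns) ++ pvApp cur last (i + 1))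
               = ns ++ pvApp cur last i := by
        rw [← pvApp_step cur last i hi']
        by_cases hc : ((((i : Nat) : Int) == (cur.length : Int) - 2 && last) ||
                       (((i : Nat) : Int) == 0 && !last)) = true
        · simp [hc]
        · simp [hc]
      have e2 : (arr ++ [(pvDiffs cur)[i]'hi'] ++ (pvDiffs cur).drop (i + 1))
               = arr ++ (pvDiffs cur).drop i := by
        rw [hcons]; simp
      have e3 : ((if ((pvDiffs cur)[i]'hi') != 0 then false else az) &&
                 (((pvDiffs cur).drop (i + 1)).all (· == 0)))
               = (az && (((pvDiffs cur).drop i).all (· == 0))) := by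
        rw [hcons, List.all_cons]
        by_cases hz : ((pvDiffs cur)[i]'hi') = 0
        · simp [hz]
        · simp [hz, bne_iff_ne]
      rw [e1, e2, e3]
    · have hdrop : (pvDiffs cur).drop i = [] := by rw [List.drop_eq_nil_iff]; omega
      rw [pvInnerA, if_neg h]
      simp [hdrop, pvApp]

theorem pvDiffs_eq_zip (seq : List Int) :
    ((seq.zip (PySem.List.slice seq (some 1) none)).map (fun p => p.2 - p.1)) = pvDiffs seq := by
  simp [pvDiffs, PySem.List.slice_from_one, List.zip, List.drop_one, List.map_zipWith]

theorem any_ne_eq_not_all_eq (l : List Int) :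
    (l.any fun x => x != 0) = !(l.all fun x => x == 0) := by
  induction l with
  | nil => rfl
  | cons a l ih =>
    rw [List.any_cons, List.all_cons, ih, Bool.not_and]
    cases h : a == 0 <;> simp [bne, h]

theorem pvApp_zero (cur : List Int) (last : Bool) (h : pvDiffs cur ≠ []) :
    pvApp cur last 0 =
      if last then [(pvDiffs cur).getLastD 0] else [(pvDiffs cur).headD 0] := by
  unfold pvApp
  simp [List.isEmpty_iff, h]

theorem pvLoopA_eq_aux :
    ∀ (fuel : Nat) (cur : List Int) (last : Bool) (ns : List Int) (fuel' : Nat),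
      cur.length ≤ fuel → cur.length ≤ fuel' →
      pvLoopA fuel cur last ns = ns ++ pvLevels fuel' last cur := by
  intro fuel
  induction fuel with
  | zero =>
    intro cur last ns fuel' hk hk'
    have hcur : cur = [] := by cases cur <;> simp_all
    subst hcur
    cases fuel' with
    | zero => simp [pvLoopA, pvLevels]
    | succ f => simp [pvLoopA, pvLevels]
  | succ fuel ih =>
    intro cur last ns fuel' hk hk'
    have hD := length_pvDiffs cur
    rw [pvLoopA, pvInnerA_spec cur last cur.length 0 [] [] true (by omega)]
    simp only [List.drop_zero, List.nil_append, Bool.true_and]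
    by_cases hlen : cur.length < 2
    · have hnil : pvDiffs cur = [] := by
        rw [← List.length_eq_zero_iff]; omega
      cases fuel' with
      | zero => simp [pvLevels, hnil, pvApp]
      | succ f => rw [pvLevels, if_pos hlen]; simp [hnil, pvApp]
    · obtain ⟨f, rfl⟩ : ∃ f, fuel' = f + 1 := by
        cases fuel' with
        | zero => omega
        | succ f => exact ⟨f, rfl⟩
      rw [pvLevels, if_neg hlen]
      have hne : pvDiffs cur ≠ [] := by
        intro h0; rw [← List.length_eq_zero_iff] at h0; omega
      have hb : (if last then (PySem.List.pyGet? (pvDiffs cur) (-1)).getD 0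
                 else (PySem.List.pyGet? (pvDiffs cur) 0).getD 0) =
                (if last then (pvDiffs cur).getLastD 0 else (pvDiffs cur).headD 0) := by
        rw [PySem.List.pyGet?_neg_one, PySem.List.pyGet?_zero]
        cases last
        · simp [List.headD_eq_head?, List.head?_eq_getElem?]
        · simp [List.getLastD_eq_getLast?]
      simp only [pvDiffs_eq_zip, hb, any_ne_eq_not_all_eq]
      by_cases haz : ((pvDiffs cur).all fun x => x == 0) = true
      · rw [if_pos haz, haz]
        simp only [Bool.not_true, Bool.false_eq_true, if_false]
        rw [pvApp_zero cur last hne]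
        cases last <;> rfl
      · rw [if_neg haz, eq_false_of_ne_true haz]
        simp only [Bool.not_false, if_true]
        rw [ih (pvDiffs cur) last _ f (by omega) (by omega)]
        rw [pvApp_zero cur last hne]
        cases last <;> simp

theorem pvLoopA_eq (cur : List Int) (last : Bool) (ns : List Int) :
    pvLoopA cur.length cur last ns = ns ++ pvLevels cur.length last cur :=
  pvLoopA_eq_aux cur.length cur last ns cur.length (le_refl _) (le_refl _)

-- ===== VERDICT (by name: the statement is the Claim_ definition above) =====
theorem get_lf_nums_spec : Claim_equal_get_lf_nums := by
  intro nums last _ _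
  unfold Spec_get_lf_nums get_lf_nums get_lf_nums_alt
  rw [PySem.List.foldl_append_singleton_eq_map]
  exact List.map_congr_left (fun n _ => pvLoopA_eq n last _)
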